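-- pv_equiv track=rewrite | github.com/aryasuneesh/parser_dataset_generator | analysis/path_coverage_analysis.py | extract_nodes_from_original_path
-- ===== SOURCE A (Python) =====
-- from typing import Dict, List, Set
--
-- def extract_nodes_from_original_path(original_data: dict) -> Dict[str, Set[str]]:
--     """Extract nodes from original path structure"""
--     nodes = {
--         'attributes': set(),
--         'exposures': set(),
--         'tickers': set(),
--         'asset_types': set(),
--         'sebi': set(),
--         'vehicles': set(),
--         'objectives': set()
--     }
--
--     # Map the original keys to our standardized categories
--     category_mapping = {
--         'exposure': 'exposures',
--         'attribute': 'attributes',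
--         'ticker': 'tickers',
--         'asset_type': 'asset_types',
--         'sebi_classification': 'sebi',
--         'vehicle': 'vehicles',
--         'objective': 'objectives'
--     }
--
--     for orig_category, paths in original_data.items():
--         if orig_category in category_mapping:
--             category = category_mapping[orig_category]
--             nodes[category].update(paths)
--
--     return nodes
-- ===== SOURCE B (Python) =====
-- def extract_nodes_from_original_path(original_data: dict):
--     """Extract nodes from original path structure (mapping-driven rebuild)."""
--     inverse_mapping = {
--         'attributes': 'attribute',
--         'exposures': 'exposure',
--         'tickers': 'ticker',
--         'asset_types': 'asset_type',
--         'sebi': 'sebi_classification',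
--         'vehicles': 'vehicle',
--         'objectives': 'objective',
--     }
--     return {std: set(original_data.get(orig, ()))
--             for std, orig in inverse_mapping.items()}
-- ===== Notes on version B (the rewrite author's own statement) =====
-- stated objective: simpler
-- what changed: B inverts the traversal: instead of scanning the input dict, probing the category mapping and mutating pre-initialized empty sets, it scans the fixed inverse mapping and builds the result directly as a dict comprehension, probing the input once per category with .get.
import Mathlib
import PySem

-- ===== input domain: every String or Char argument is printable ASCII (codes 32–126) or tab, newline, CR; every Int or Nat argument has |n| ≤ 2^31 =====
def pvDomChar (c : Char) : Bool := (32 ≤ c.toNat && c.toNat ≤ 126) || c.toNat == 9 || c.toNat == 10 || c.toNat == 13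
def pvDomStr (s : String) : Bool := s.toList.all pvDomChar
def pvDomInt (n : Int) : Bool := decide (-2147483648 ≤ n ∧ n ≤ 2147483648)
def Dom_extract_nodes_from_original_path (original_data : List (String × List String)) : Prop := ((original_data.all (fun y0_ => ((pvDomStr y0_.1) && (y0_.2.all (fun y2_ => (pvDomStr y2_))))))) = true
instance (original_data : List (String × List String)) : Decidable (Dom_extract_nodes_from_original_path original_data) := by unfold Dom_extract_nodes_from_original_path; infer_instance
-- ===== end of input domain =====

-- B inverts A's traversal: it scans the fixed category mapping probing the input once per category
-- (a dict comprehension), instead of scanning the input and mutating pre-initialized sets (objective: simpler).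


-- ===== PORT A =====
def extract_nodes_from_original_path (original_data : List (String × List String)) : List (String × List String) :=
  let nodes : PySem.Dict String (PySem.Set String) :=
    PySem.Dict.mk
      [("attributes", PySem.Set.empty), ("exposures", PySem.Set.empty), ("tickers", PySem.Set.empty),
       ("asset_types", PySem.Set.empty), ("sebi", PySem.Set.empty), ("vehicles", PySem.Set.empty),
       ("objectives", PySem.Set.empty)]
  let category_mapping : PySem.Dict String String :=
    PySem.Dict.mk
      [("exposure", "exposures"), ("attribute", "attributes"), ("ticker", "tickers"),
       ("asset_type", "asset_types"), ("sebi_classification", "sebi"), ("vehicle", "vehicles"),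
       ("objective", "objectives")]
  let nodes := original_data.foldl (fun nd p =>
      match category_mapping.get? p.1 with
      | some category => nd.modify category PySem.Set.empty (fun s => PySem.Set.update s p.2)
      | none => nd) nodes
  nodes.items

-- ===== PORT B =====
def extract_nodes_from_original_path_alt (original_data : List (String × List String)) : List (String × List String) :=
  let inverse_mapping : List (String × String) :=
    [("attributes", "attribute"), ("exposures", "exposure"), ("tickers", "ticker"),
     ("asset_types", "asset_type"), ("sebi", "sebi_classification"), ("vehicles", "vehicle"),
     ("objectives", "objective")]
  inverse_mapping.map (fun p =>
    (p.1, PySem.Set.ofList (PySem.Dict.getD (PySem.Dict.mk original_data) p.2 [])))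

-- ===== PRECONDITION & SPEC =====
-- Pre_ excludes association lists with duplicate keys: they do not represent a Python dict (A's
-- parameter type), and on them the ports' behaviours (union of all matching entries vs first entry)
-- are both artefacts of the list rendering.
def Pre_extract_nodes_from_original_path (original_data : List (String × List String)) : Prop :=
  (original_data.map Prod.fst).Nodup
instance (original_data : List (String × List String)) : Decidable (Pre_extract_nodes_from_original_path original_data) := by unfold Pre_extract_nodes_from_original_path; infer_instance
def pvWitness_extract_nodes_from_original_path : (List (String × List String)) :=
  [("exposure", ["a", "b", "a"]), ("junk", ["z"]), ("ticker", [])]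

def Spec_extract_nodes_from_original_path (original_data : List (String × List String)) (out : List (String × List String)) : Prop := out = extract_nodes_from_original_path_alt original_data
instance (original_data : List (String × List String)) (out : List (String × List String)) : Decidable (Spec_extract_nodes_from_original_path original_data out) := by unfold Spec_extract_nodes_from_original_path; infer_instance

-- ===== CLAIM (what is proved, stated in full; the proofs are below) =====
def Claim_equal_extract_nodes_from_original_path : Prop := ∀ (original_data : List (String × List String)), Dom_extract_nodes_from_original_path original_data → Pre_extract_nodes_from_original_path original_data → Spec_extract_nodes_from_original_path original_data (extract_nodes_from_original_path original_data)

-- ===== LEMMAS AND PROOFS =====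

-- the per-category accumulation A performs, isolated per original key
def pvUpd (orig : String) (l : List (String × List String)) (s : PySem.Set String) : PySem.Set String :=
  l.foldl (fun s p => if p.1 = orig then PySem.Set.update s p.2 else s) s

theorem pvUpd_no_key (orig : String) (l : List (String × List String)) (s : PySem.Set String)
    (h : ∀ p ∈ l, p.1 ≠ orig) : pvUpd orig l s = s := by
  induction l with
  | nil => rfl
  | cons q t ih =>
      simp only [pvUpd, List.foldl_cons]
      rw [if_neg (h q (by simp))]
      exact ih (fun p hp => h p (by simp [hp]))

-- with distinct keys, accumulating over all entries with key `orig` is just set() of the first lookup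
theorem pvUpd_eq_ofList (orig : String) (l : List (String × List String))
    (hnd : (l.map Prod.fst).Nodup) :
    pvUpd orig l [] = PySem.Set.ofList (PySem.Dict.getD (PySem.Dict.mk l) orig []) := by
  induction l with
  | nil => rfl
  | cons q t ih =>
      obtain ⟨k, v⟩ := q
      simp only [List.map_cons, List.nodup_cons] at hnd
      by_cases hk : k = orig
      · simp only [pvUpd, List.foldl_cons, if_pos hk]
        have hnone : ∀ p ∈ t, p.1 ≠ orig := by
          intro p hp he
          apply hnd.1
          rw [show (k : String) = p.1 by rw [hk, he]]
          exact List.mem_map_of_mem hp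
        rw [show t.foldl (fun s p => if p.1 = orig then PySem.Set.update s p.2 else s)
              (PySem.Set.update [] v) = pvUpd orig t (PySem.Set.update [] v) from rfl,
            pvUpd_no_key orig t _ hnone]
        have : PySem.Dict.getD (PySem.Dict.mk ((k, v) :: t)) orig [] = v := by
          simp [PySem.Dict.getD_eq_get?_getD, PySem.Dict.get?_mk_cons, hk]
        rw [this]
        rfl
      · simp only [pvUpd, List.foldl_cons, if_neg hk]
        rw [show t.foldl (fun s p => if p.1 = orig then PySem.Set.update s p.2 else s) [] =
              pvUpd orig t [] from rfl, ih hnd.2]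
        have : PySem.Dict.getD (PySem.Dict.mk ((k, v) :: t)) orig [] =
               PySem.Dict.getD (PySem.Dict.mk t) orig [] := by
          simp [PySem.Dict.getD_eq_get?_getD, PySem.Dict.get?_mk_cons, hk]
        rw [this]

-- A's loop over the seven-slot dict, slotwise
theorem pvFold_seven (l : List (String × List String))
    (a e t at_ sb vh ob : PySem.Set String) :
    l.foldl (fun nd p =>
      match (PySem.Dict.mk
        [("exposure", "exposures"), ("attribute", "attributes"), ("ticker", "tickers"),
         ("asset_type", "asset_types"), ("sebi_classification", "sebi"), ("vehicle", "vehicles"),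
         ("objective", "objectives")] : PySem.Dict String String).get? p.1 with
      | some category => nd.modify category PySem.Set.empty (fun s => PySem.Set.update s p.2)
      | none => nd)
      (PySem.Dict.mk
        [("attributes", a), ("exposures", e), ("tickers", t), ("asset_types", at_), ("sebi", sb), ("vehicles", vh), ("objectives", ob)]) =
    PySem.Dict.mk
      [("attributes", pvUpd "attribute" l a), ("exposures", pvUpd "exposure" l e),
       ("tickers", pvUpd "ticker" l t), ("asset_types", pvUpd "asset_type" l at_),
       ("sebi", pvUpd "sebi_classification" l sb), ("vehicles", pvUpd "vehicle" l vh),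
       ("objectives", pvUpd "objective" l ob)] := by
  induction l generalizing a e t at_ sb vh ob with
  | nil => rfl
  | cons q rest ih =>
      obtain ⟨k, v⟩ := q
      simp only [List.foldl_cons]
      by_cases h1 : k = "exposure"
      · rw [show (PySem.Dict.mk
            [("exposure", "exposures"), ("attribute", "attributes"), ("ticker", "tickers"),
         ("asset_type", "asset_types"), ("sebi_classification", "sebi"), ("vehicle", "vehicles"),
         ("objective", "objectives")] : PySem.Dict String String).get? k = some "exposures" by
              simp [PySem.Dict.get?_mk_cons, h1]]
        show List.foldl _ ((PySem.Dict.mk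
            [("attributes", a), ("exposures", e), ("tickers", t), ("asset_types", at_), ("sebi", sb), ("vehicles", vh), ("objectives", ob)]).modify "exposures"
              PySem.Set.empty (fun s => PySem.Set.update s v)) rest = _
        rw [show (PySem.Dict.mk
            [("attributes", a), ("exposures", e), ("tickers", t), ("asset_types", at_), ("sebi", sb), ("vehicles", vh), ("objectives", ob)]).modify "exposures"
              PySem.Set.empty (fun s => PySem.Set.update s v) =
            PySem.Dict.mk [("attributes", a), ("exposures", PySem.Set.update e v), ("tickers", t), ("asset_types", at_), ("sebi", sb), ("vehicles", vh), ("objectives", ob)] by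
              simp [PySem.Dict.modify, PySem.Dict.insert, PySem.Dict.contains, PySem.Dict.getD_eq_get?_getD, PySem.Dict.get?_mk_cons]]
        rw [ih]
        simp [pvUpd, h1]
      by_cases h2 : k = "attribute"
      · rw [show (PySem.Dict.mk
            [("exposure", "exposures"), ("attribute", "attributes"), ("ticker", "tickers"),
         ("asset_type", "asset_types"), ("sebi_classification", "sebi"), ("vehicle", "vehicles"),
         ("objective", "objectives")] : PySem.Dict String String).get? k = some "attributes" by
              simp [PySem.Dict.get?_mk_cons, h2]]
        show List.foldl _ ((PySem.Dict.mk
            [("attributes", a), ("exposures", e), ("tickers", t), ("asset_types", at_), ("sebi", sb), ("vehicles", vh), ("objectives", ob)]).modify "attributes"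
              PySem.Set.empty (fun s => PySem.Set.update s v)) rest = _
        rw [show (PySem.Dict.mk
            [("attributes", a), ("exposures", e), ("tickers", t), ("asset_types", at_), ("sebi", sb), ("vehicles", vh), ("objectives", ob)]).modify "attributes"
              PySem.Set.empty (fun s => PySem.Set.update s v) =
            PySem.Dict.mk [("attributes", PySem.Set.update a v), ("exposures", e), ("tickers", t), ("asset_types", at_), ("sebi", sb), ("vehicles", vh), ("objectives", ob)] by
              simp [PySem.Dict.modify, PySem.Dict.insert, PySem.Dict.contains, PySem.Dict.getD_eq_get?_getD, PySem.Dict.get?_mk_cons]]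
        rw [ih]
        simp [pvUpd, h2]
      by_cases h3 : k = "ticker"
      · rw [show (PySem.Dict.mk
            [("exposure", "exposures"), ("attribute", "attributes"), ("ticker", "tickers"),
         ("asset_type", "asset_types"), ("sebi_classification", "sebi"), ("vehicle", "vehicles"),
         ("objective", "objectives")] : PySem.Dict String String).get? k = some "tickers" by
              simp [PySem.Dict.get?_mk_cons, h3]]
        show List.foldl _ ((PySem.Dict.mk
            [("attributes", a), ("exposures", e), ("tickers", t), ("asset_types", at_), ("sebi", sb), ("vehicles", vh), ("objectives", ob)]).modify "tickers"
              PySem.Set.empty (fun s => PySem.Set.update s v)) rest = _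
        rw [show (PySem.Dict.mk
            [("attributes", a), ("exposures", e), ("tickers", t), ("asset_types", at_), ("sebi", sb), ("vehicles", vh), ("objectives", ob)]).modify "tickers"
              PySem.Set.empty (fun s => PySem.Set.update s v) =
            PySem.Dict.mk [("attributes", a), ("exposures", e), ("tickers", PySem.Set.update t v), ("asset_types", at_), ("sebi", sb), ("vehicles", vh), ("objectives", ob)] by
              simp [PySem.Dict.modify, PySem.Dict.insert, PySem.Dict.contains, PySem.Dict.getD_eq_get?_getD, PySem.Dict.get?_mk_cons]]
        rw [ih]
        simp [pvUpd, h3]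
      by_cases h4 : k = "asset_type"
      · rw [show (PySem.Dict.mk
            [("exposure", "exposures"), ("attribute", "attributes"), ("ticker", "tickers"),
         ("asset_type", "asset_types"), ("sebi_classification", "sebi"), ("vehicle", "vehicles"),
         ("objective", "objectives")] : PySem.Dict String String).get? k = some "asset_types" by
              simp [PySem.Dict.get?_mk_cons, h4]]
        show List.foldl _ ((PySem.Dict.mk
            [("attributes", a), ("exposures", e), ("tickers", t), ("asset_types", at_), ("sebi", sb), ("vehicles", vh), ("objectives", ob)]).modify "asset_types"
              PySem.Set.empty (fun s => PySem.Set.update s v)) rest = _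
        rw [show (PySem.Dict.mk
            [("attributes", a), ("exposures", e), ("tickers", t), ("asset_types", at_), ("sebi", sb), ("vehicles", vh), ("objectives", ob)]).modify "asset_types"
              PySem.Set.empty (fun s => PySem.Set.update s v) =
            PySem.Dict.mk [("attributes", a), ("exposures", e), ("tickers", t), ("asset_types", PySem.Set.update at_ v), ("sebi", sb), ("vehicles", vh), ("objectives", ob)] by
              simp [PySem.Dict.modify, PySem.Dict.insert, PySem.Dict.contains, PySem.Dict.getD_eq_get?_getD, PySem.Dict.get?_mk_cons]]
        rw [ih]
        simp [pvUpd, h4]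
      by_cases h5 : k = "sebi_classification"
      · rw [show (PySem.Dict.mk
            [("exposure", "exposures"), ("attribute", "attributes"), ("ticker", "tickers"),
         ("asset_type", "asset_types"), ("sebi_classification", "sebi"), ("vehicle", "vehicles"),
         ("objective", "objectives")] : PySem.Dict String String).get? k = some "sebi" by
              simp [PySem.Dict.get?_mk_cons, h5]]
        show List.foldl _ ((PySem.Dict.mk
            [("attributes", a), ("exposures", e), ("tickers", t), ("asset_types", at_), ("sebi", sb), ("vehicles", vh), ("objectives", ob)]).modify "sebi"
              PySem.Set.empty (fun s => PySem.Set.update s v)) rest = _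
        rw [show (PySem.Dict.mk
            [("attributes", a), ("exposures", e), ("tickers", t), ("asset_types", at_), ("sebi", sb), ("vehicles", vh), ("objectives", ob)]).modify "sebi"
              PySem.Set.empty (fun s => PySem.Set.update s v) =
            PySem.Dict.mk [("attributes", a), ("exposures", e), ("tickers", t), ("asset_types", at_), ("sebi", PySem.Set.update sb v), ("vehicles", vh), ("objectives", ob)] by
              simp [PySem.Dict.modify, PySem.Dict.insert, PySem.Dict.contains, PySem.Dict.getD_eq_get?_getD, PySem.Dict.get?_mk_cons]]
        rw [ih]
        simp [pvUpd, h5]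
      by_cases h6 : k = "vehicle"
      · rw [show (PySem.Dict.mk
            [("exposure", "exposures"), ("attribute", "attributes"), ("ticker", "tickers"),
         ("asset_type", "asset_types"), ("sebi_classification", "sebi"), ("vehicle", "vehicles"),
         ("objective", "objectives")] : PySem.Dict String String).get? k = some "vehicles" by
              simp [PySem.Dict.get?_mk_cons, h6]]
        show List.foldl _ ((PySem.Dict.mk
            [("attributes", a), ("exposures", e), ("tickers", t), ("asset_types", at_), ("sebi", sb), ("vehicles", vh), ("objectives", ob)]).modify "vehicles"
              PySem.Set.empty (fun s => PySem.Set.update s v)) rest = _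
        rw [show (PySem.Dict.mk
            [("attributes", a), ("exposures", e), ("tickers", t), ("asset_types", at_), ("sebi", sb), ("vehicles", vh), ("objectives", ob)]).modify "vehicles"
              PySem.Set.empty (fun s => PySem.Set.update s v) =
            PySem.Dict.mk [("attributes", a), ("exposures", e), ("tickers", t), ("asset_types", at_), ("sebi", sb), ("vehicles", PySem.Set.update vh v), ("objectives", ob)] by
              simp [PySem.Dict.modify, PySem.Dict.insert, PySem.Dict.contains, PySem.Dict.getD_eq_get?_getD, PySem.Dict.get?_mk_cons]]
        rw [ih]
        simp [pvUpd, h6]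
      by_cases h7 : k = "objective"
      · rw [show (PySem.Dict.mk
            [("exposure", "exposures"), ("attribute", "attributes"), ("ticker", "tickers"),
         ("asset_type", "asset_types"), ("sebi_classification", "sebi"), ("vehicle", "vehicles"),
         ("objective", "objectives")] : PySem.Dict String String).get? k = some "objectives" by
              simp [PySem.Dict.get?_mk_cons, h7]]
        show List.foldl _ ((PySem.Dict.mk
            [("attributes", a), ("exposures", e), ("tickers", t), ("asset_types", at_), ("sebi", sb), ("vehicles", vh), ("objectives", ob)]).modify "objectives"
              PySem.Set.empty (fun s => PySem.Set.update s v)) rest = _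
        rw [show (PySem.Dict.mk
            [("attributes", a), ("exposures", e), ("tickers", t), ("asset_types", at_), ("sebi", sb), ("vehicles", vh), ("objectives", ob)]).modify "objectives"
              PySem.Set.empty (fun s => PySem.Set.update s v) =
            PySem.Dict.mk [("attributes", a), ("exposures", e), ("tickers", t), ("asset_types", at_), ("sebi", sb), ("vehicles", vh), ("objectives", PySem.Set.update ob v)] by
              simp [PySem.Dict.modify, PySem.Dict.insert, PySem.Dict.contains, PySem.Dict.getD_eq_get?_getD, PySem.Dict.get?_mk_cons]]
        rw [ih]
        simp [pvUpd, h7]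
      rw [show (PySem.Dict.mk
          [("exposure", "exposures"), ("attribute", "attributes"), ("ticker", "tickers"),
         ("asset_type", "asset_types"), ("sebi_classification", "sebi"), ("vehicle", "vehicles"),
         ("objective", "objectives")] : PySem.Dict String String).get? k = none by
            simp [PySem.Dict.get?, Ne.symm h1, Ne.symm h2, Ne.symm h3, Ne.symm h4, Ne.symm h5, Ne.symm h6, Ne.symm h7]]
      show List.foldl _ (PySem.Dict.mk
          [("attributes", a), ("exposures", e), ("tickers", t), ("asset_types", at_), ("sebi", sb), ("vehicles", vh), ("objectives", ob)]) rest = _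
      rw [ih]
      simp [pvUpd, h1, h2, h3, h4, h5, h6, h7]

-- ===== VERDICT (by name: the statement is the Claim_ definition above) =====
theorem extract_nodes_from_original_path_spec : Claim_equal_extract_nodes_from_original_path := by
  intro l _ hpre
  show extract_nodes_from_original_path l = extract_nodes_from_original_path_alt l
  unfold extract_nodes_from_original_path extract_nodes_from_original_path_alt
  simp only []
  rw [pvFold_seven]
  simp [List.map,
    pvUpd_eq_ofList "attribute" l hpre, pvUpd_eq_ofList "exposure" l hpre,
    pvUpd_eq_ofList "ticker" l hpre, pvUpd_eq_ofList "asset_type" l hpre,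
    pvUpd_eq_ofList "sebi_classification" l hpre, pvUpd_eq_ofList "vehicle" l hpre,
    pvUpd_eq_ofList "objective" l hpre]
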